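-- pv_equiv track=rewrite | github.com/arjun-nair1090/Resonance | services/api/app/recommender/engine.py | _build_artist_queries
-- ===== SOURCE A (Python) =====
-- def _build_artist_queries(user_artists: list[str], rotation: int) -> list[str]:
--     """Build seed queries for the 'Because You Like Artists' section.
--
--     user_artists is an *ordered* list so rotation offsets predictably cycle
--     through the user's actual top artists, not a random permutation.
--     """
--     if not user_artists:
--         return ["discover weekly", "artist essentials", "fresh finds"]
--     offset = rotation % len(user_artists)
--     ordered = user_artists[offset:] + user_artists[:offset]
--     queries = [f"{artist} essentials" for artist in ordered[:5]]
--     queries.extend([f"{artist} deep cuts" for artist in ordered[:3]])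
--     return queries
-- ===== SOURCE B (Python) =====
-- def _build_artist_queries(user_artists: list[str], rotation: int) -> list[str]:
--     if not user_artists:
--         return ["discover weekly", "artist essentials", "fresh finds"]
--     n = len(user_artists)
--     off = rotation % n
--     e = min(5, n)
--     d = min(3, n)
--     ess = [""] * e
--     deep = [""] * d
--     # single scatter pass: each artist lands in its output slot by rotated rank
--     for j, artist in enumerate(user_artists):
--         pos = (j - off) % n
--         if pos < e:
--             ess[pos] = artist + " essentials"
--         if pos < d:
--             deep[pos] = artist + " deep cuts"
--     return ess + deep
-- ===== Notes on version B (the rewrite author's own statement) =====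
-- stated objective: alternative
-- what changed: B replaces A's rotate-then-take-prefixes (slice concatenation, then two gather comprehensions) by a single scatter pass: it preallocates the two fixed-size output lists and, while enumerating the original list once, writes each artist into its output slot computed from its rotated rank.
import Mathlib
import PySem

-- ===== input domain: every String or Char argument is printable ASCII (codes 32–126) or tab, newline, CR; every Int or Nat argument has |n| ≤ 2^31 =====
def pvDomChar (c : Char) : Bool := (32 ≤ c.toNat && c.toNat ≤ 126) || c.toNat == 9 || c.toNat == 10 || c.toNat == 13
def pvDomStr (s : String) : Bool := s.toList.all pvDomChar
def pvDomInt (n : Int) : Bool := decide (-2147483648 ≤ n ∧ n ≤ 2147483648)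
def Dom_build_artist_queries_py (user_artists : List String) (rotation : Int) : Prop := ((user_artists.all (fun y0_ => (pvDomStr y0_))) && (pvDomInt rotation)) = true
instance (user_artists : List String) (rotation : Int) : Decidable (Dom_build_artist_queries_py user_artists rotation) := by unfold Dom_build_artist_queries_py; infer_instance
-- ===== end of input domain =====

-- B replaces A's rotate-then-take-prefixes by a single scatter pass that writes each artist
-- into its output slot by rotated rank (objective: alternative strategy, same measured cost).

-- ===== PORT A =====
def build_artist_queries_py (user_artists : List String) (rotation : Int) : List String :=
  if user_artists = [] then ["discover weekly", "artist essentials", "fresh finds"]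
  else
    let offset := PySem.Int.mod rotation (user_artists.length : Int)
    let ordered := PySem.List.slice user_artists (some offset) none ++
                   PySem.List.slice user_artists none (some offset)
    let queries := (PySem.List.slice ordered none (some 5)).map (fun artist => artist ++ " essentials")
    queries ++ (PySem.List.slice ordered none (some 3)).map (fun artist => artist ++ " deep cuts")

-- ===== PORT B =====
-- one conditional slot write of Source B's loop body: ess[pos] = artist + suffix  when pos < e
def pvStep (off : Int) (n : Nat) (e : Nat) (suffix : String)
    (acc : List String) (p : Int × String) : List String :=
  let pos := PySem.Int.mod (p.1 - off) (n : Int)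
  if pos < (e : Int) then PySem.List.pySetD acc pos (p.2 ++ suffix) else acc

def build_artist_queries_py_alt (user_artists : List String) (rotation : Int) : List String :=
  if user_artists = [] then ["discover weekly", "artist essentials", "fresh finds"]
  else
    let n := user_artists.length
    let off := PySem.Int.mod rotation (n : Int)
    let e := min 5 n
    let d := min 3 n
    let st := (PySem.List.enumerate user_artists 0).foldl
      (fun (st : List String × List String) p =>
        (pvStep off n e " essentials" st.1 p, pvStep off n d " deep cuts" st.2 p))
      (List.replicate e "", List.replicate d "")
    st.1 ++ st.2

-- ===== PRECONDITION & SPEC =====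
def Spec_build_artist_queries_py (user_artists : List String) (rotation : Int) (out : List String) : Prop := out = build_artist_queries_py_alt user_artists rotation
instance (user_artists : List String) (rotation : Int) (out : List String) : Decidable (Spec_build_artist_queries_py user_artists rotation out) := by unfold Spec_build_artist_queries_py; infer_instance

-- ===== CLAIM (what is proved, stated in full; the proofs are below) =====
def Claim_equal_build_artist_queries_py : Prop := ∀ (user_artists : List String) (rotation : Int), Dom_build_artist_queries_py user_artists rotation → Spec_build_artist_queries_py user_artists rotation (build_artist_queries_py user_artists rotation)

-- ===== LEMMAS AND PROOFS =====

-- the scatter fold preserves the length of the accumulator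
lemma pvStep_foldl_length (off : Int) (n e : Nat) (s : String)
    (js : List (Int × String)) (acc : List String) :
    (js.foldl (pvStep off n e s) acc).length = acc.length := by
  induction js generalizing acc with
  | nil => rfl
  | cons p js ih =>
      simp only [List.foldl_cons, ih]
      simp only [pvStep]
      split
      · simp [PySem.List.length_pySetD]
      · rfl

-- a fold whose writes all go to slots ≠ q leaves slot q unchanged
lemma pvStep_foldl_no_write (off : Int) (n e : Nat) (s : String)
    (js : List (Int × String)) (acc : List String) (q : Nat) (hnpos : 0 < n)
    (h : ∀ p ∈ js, PySem.Int.mod (p.1 - off) (n : Int) ≠ (q : Int)) :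
    (js.foldl (pvStep off n e s) acc)[q]? = acc[q]? := by
  induction js generalizing acc with
  | nil => rfl
  | cons p js ih =>
      simp only [List.foldl_cons]
      rw [ih _ (fun r hr => h r (List.mem_cons_of_mem _ hr))]
      simp only [pvStep]
      split
      · next hlt =>
          have hq := h p (List.mem_cons_self ..)
          have h0 : 0 ≤ PySem.Int.mod (p.1 - off) (n : Int) :=
            PySem.Int.mod_nonneg _ (by exact_mod_cast hnpos)
          rw [PySem.List.pySetD_of_nonneg _ _ h0, List.getElem?_set_ne (by omega)]
      · rfl

-- the slot index of the pair (j, a), as a Nat, for 0 ≤ off < n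
lemma pvStep_pos_eq (off : Int) (n : Nat) (hn : 0 < n) (h0 : 0 ≤ off) (hlt : off < (n : Int))
    (j : Nat) :
    PySem.Int.mod ((j : Int) - off) (n : Int) = (((j + (n - off.toNat)) % n : Nat) : Int) := by
  rw [PySem.Int.mod_eq_emod_of_pos (by exact_mod_cast hn : (0 : Int) < (n : Int))]
  have h1 : (j : Int) - off = ((j + (n - off.toNat) : Nat) : Int) - (n : Int) := by
    push_cast; omega
  rw [h1, Int.sub_emod_right]
  exact (Int.natCast_mod _ _).symm

-- the scatter fold over the enumerated list fills slot q with the artist of rotated rank q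
lemma pvScatter_eq (ua : List String) (hne : ua ≠ []) (off : Int)
    (h0 : 0 ≤ off) (hlt : off < (ua.length : Int)) (e : Nat) (he : e ≤ ua.length) (s : String) :
    (PySem.List.enumerate ua 0).foldl (pvStep off ua.length e s) (List.replicate e "") =
    (List.range e).map (fun q => ua.getD ((off.toNat + q) % ua.length) "" ++ s) := by
  set n := ua.length with hn
  have hnpos : 0 < n := List.length_pos_of_ne_nil hne
  set o := off.toNat with ho
  have holt : o < n := by omega
  apply List.ext_getElem?
  intro q
  by_cases hq : q < e
  · -- slot q is written exactly once, at original index j0 = (o + q) % n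
    set j0 := (o + q) % n with hj0
    have hj0lt : j0 < n := Nat.mod_lt _ hnpos
    have hposj0 : (j0 + (n - o)) % n = q := by
      rw [hj0, Nat.mod_add_mod, show o + q + (n - o) = q + n by omega,
          Nat.add_mod_right, Nat.mod_eq_of_lt (by omega)]
    have hkey : ∀ j : Nat, j < n → (j + (n - o)) % n = q → j = j0 := by
      intro j hj hpos
      have h2 : (j + (n - o)) % n = (j0 + (n - o)) % n := by rw [hpos, hposj0]
      have := Nat.ModEq.add_right_cancel' (n - o) h2
      rwa [Nat.ModEq, Nat.mod_eq_of_lt hj, Nat.mod_eq_of_lt hj0lt] at this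
    -- split the enumerated list at index j0
    have hsplit : ua = ua.take j0 ++ ua[j0] :: ua.drop (j0 + 1) := by
      rw [List.getElem_cons_drop, List.take_append_drop]
    have hlen_take : (ua.take j0).length = j0 := by
      rw [List.length_take]; omega
    conv_lhs => rw [hsplit]
    rw [PySem.List.enumerate_append, PySem.List.enumerate_cons, List.foldl_append,
        List.foldl_cons, hlen_take]
    -- the suffix never writes slot q
    rw [pvStep_foldl_no_write _ _ _ _ _ _ _ hnpos ?_]
    · -- the middle pair (j0, ua[j0]) writes exactly slot q
      rw [show pvStep off n e s _ ((0 : Int) + (j0 : Int), ua[j0])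
            = ((PySem.List.enumerate (ua.take j0) 0).foldl (pvStep off n e s) (List.replicate e "")).set q (ua[j0] ++ s) from ?_]
      · -- the prefix never writes slot q either, so slot q of the set is the written value
        have hlen : ((PySem.List.enumerate (ua.take j0) 0).foldl (pvStep off n e s) (List.replicate e "")).length = e := by
          rw [pvStep_foldl_length, List.length_replicate]
        rw [List.getElem?_set_self (by rw [hlen]; exact hq)]
        simp only [List.getElem?_map, List.getElem?_range hq, Option.map_some]
        rw [List.getD_eq_getElem?_getD, ← hj0, List.getElem?_eq_getElem hj0lt]
        rfl
      · -- evaluate the middle step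
        simp only [pvStep]
        have hpos : PySem.Int.mod ((0 : Int) + (j0 : Int) - off) (n : Int) = (q : Int) := by
          rw [Int.zero_add, pvStep_pos_eq off n hnpos h0 hlt j0, ← ho, hposj0]
        simp only [hpos]
        rw [if_pos (by exact_mod_cast hq)]
        simp
    · -- suffix writers: indices j0+1 ≤ j < n, none maps to slot q
      intro p hp
      rw [PySem.List.mem_enumerate_iff] at hp
      obtain ⟨k, hk, rfl⟩ := hp
      have hklen : k < n - (j0 + 1) := by
        have := hk; simp only [List.length_drop] at this; omega
      have hfst : (0 : Int) + (j0 : Int) + 1 + (k : Int) = ((j0 + 1 + k : Nat) : Int) := by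
        push_cast; ring
      rw [hfst, pvStep_pos_eq off n hnpos h0 hlt (j0 + 1 + k), ← ho]
      intro hcontra
      have hje : (j0 + 1 + k + (n - o)) % n = q := by exact_mod_cast hcontra
      have := hkey (j0 + 1 + k) (by omega) hje
      omega
  · -- q out of range on both sides
    rw [List.getElem?_eq_none (by rw [pvStep_foldl_length, List.length_replicate]; omega),
        List.getElem?_eq_none (by simp; omega)]

-- a prefix of a list, element by element
lemma pvTake_eq_map_range_getD (l : List String) (k : Nat) :
    l.take k = (List.range (min k l.length)).map (fun i => l.getD i "") := by
  apply List.ext_getElem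
  · simp
  · intro i h1 h2
    have hi : i < l.length := by simp at h1; omega
    simp [List.getD_eq_getElem?_getD, List.getElem?_eq_getElem hi]

-- a prefix of the rotation, read by modular indexing into the original list
lemma pvTake_rotate (l : List String) (off k : Nat) (hn : 0 < l.length) :
    (l.rotate off).take k =
    (List.range (min k l.length)).map (fun i => l.getD ((off + i) % l.length) "") := by
  rw [pvTake_eq_map_range_getD (l.rotate off) k]
  rw [List.length_rotate]
  apply List.map_congr_left
  intro i hi
  have hi' : i < l.length := by
    have := List.mem_range.mp hi; omega
  have hr : i < (l.rotate off).length := by simpa using hi'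
  have hmod : (off + i) % l.length < l.length := Nat.mod_lt _ hn
  simp [List.getD_eq_getElem?_getD, List.getElem?_eq_getElem hr,
        List.getElem?_eq_getElem hmod, List.getElem_rotate, Nat.add_comm i off]

-- ===== VERDICT (by name: the statement is the Claim_ definition above) =====
theorem build_artist_queries_py_spec : Claim_equal_build_artist_queries_py := by
  intro ua rotation _
  unfold Spec_build_artist_queries_py build_artist_queries_py build_artist_queries_py_alt
  by_cases h : ua = []
  · simp [h]
  · simp only [h, if_false]
    have hn : 0 < ua.length := List.length_pos_of_ne_nil h
    set off := PySem.Int.mod rotation (ua.length : Int) with hoff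
    have h0 : 0 ≤ off := PySem.Int.mod_nonneg _ (by exact_mod_cast hn)
    have hlt : off < (ua.length : Int) := PySem.Int.mod_lt _ (by exact_mod_cast hn)
    have hle : off.toNat ≤ ua.length := by omega
    -- A's rotated copy is List.rotate
    have hord : PySem.List.slice ua (some off) none ++ PySem.List.slice ua none (some off)
        = ua.rotate off.toNat := by
      rw [PySem.List.slice_from _ h0, PySem.List.slice_to _ h0,
          List.rotate_eq_drop_append_take hle]
    -- B's pair fold is two independent folds
    rw [PySem.List.foldl_prod_mk
          (f := fun acc p => pvStep off ua.length (min 5 ua.length) " essentials" acc p)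
          (g := fun acc p => pvStep off ua.length (min 3 ua.length) " deep cuts" acc p)]
    rw [pvScatter_eq ua h off h0 hlt (min 5 ua.length) (Nat.min_le_right _ _) " essentials",
        pvScatter_eq ua h off h0 hlt (min 3 ua.length) (Nat.min_le_right _ _) " deep cuts"]
    rw [hord, PySem.List.slice_to _ (by norm_num), PySem.List.slice_to _ (by norm_num)]
    simp only [show Int.toNat 5 = 5 from rfl, show Int.toNat 3 = 3 from rfl]
    rw [pvTake_rotate ua off.toNat 5 hn, pvTake_rotate ua off.toNat 3 hn]
    simp [List.map_map, Function.comp_def]
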